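-- pv_equiv track=rewrite | github.com/Rishat-F/secretary | src/stuff/schedule/utils.py | _no_not_available_week_after_available
-- ===== SOURCE A (Python) =====
-- class ScheduleDayStatus:
--     NOT_AVAILABLE = "not_available_"
--     NOT_SELECTED = "not_selected_"
--     SELECTED = "selected_"
--     IGNORE = "ignore"
--
-- def is_week_element(element: str) -> bool:
--     return "week" in element
--
-- def _no_not_available_week_after_available(days_statuses) -> bool:
--     weeks_elements = [element for element in days_statuses if is_week_element(element)]
--     prev_element = ""
--     for element in weeks_elements:
--         if (
--             (
--                 ScheduleDayStatus.NOT_SELECTED in prev_element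
--                 or ScheduleDayStatus.SELECTED in prev_element
--             )
--             and ScheduleDayStatus.NOT_AVAILABLE in element
--         ):
--             return False
--         prev_element = element
--     return True
-- ===== SOURCE B (Python) =====
-- def _no_not_available_week_after_available(days_statuses) -> bool:
--     # Single fused pass: no intermediate weeks list; a boolean "previous week
--     # element was available" flag replaces the stored prev string, using the
--     # fact that "not_selected_" itself contains "selected_".
--     prev_available = False
--     for element in days_statuses:
--         if "week" in element:
--             if prev_available and "not_available_" in element:
--                 return False
--             prev_available = "selected_" in element
--     return True
-- ===== Notes on version B (the rewrite author's own statement) =====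
-- stated objective: simpler
-- what changed: B fuses the filter-then-scan into one pass over the input with a boolean 'previous week element was available' flag instead of retaining the previous element string, collapsing the two substring tests to one via the fact that 'not_selected_' contains 'selected_'.
import Mathlib
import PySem

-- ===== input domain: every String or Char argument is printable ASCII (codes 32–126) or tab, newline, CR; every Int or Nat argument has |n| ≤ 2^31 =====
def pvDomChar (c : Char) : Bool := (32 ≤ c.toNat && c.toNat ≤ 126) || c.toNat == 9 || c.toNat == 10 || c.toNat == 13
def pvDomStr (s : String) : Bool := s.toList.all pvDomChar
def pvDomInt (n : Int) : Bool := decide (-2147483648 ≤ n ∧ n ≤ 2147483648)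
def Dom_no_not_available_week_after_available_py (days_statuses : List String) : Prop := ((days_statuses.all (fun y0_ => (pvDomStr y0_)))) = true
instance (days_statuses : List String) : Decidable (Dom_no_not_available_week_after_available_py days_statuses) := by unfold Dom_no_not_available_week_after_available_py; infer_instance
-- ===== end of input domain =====

-- B: one fused pass with a boolean "previous week element was available" flag instead of filter + prev-string tracking (simpler).


-- ===== PORT A =====
-- loop over weeks_elements carrying the previous element string
def pvLoopA : List String → String → Bool
  | [], _ => true
  | element :: rest, prev_element =>
    if (PySem.Str.isIn "not_selected_" prev_element || PySem.Str.isIn "selected_" prev_element)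
        && PySem.Str.isIn "not_available_" element then false
    else pvLoopA rest element

def no_not_available_week_after_available_py (days_statuses : List String) : Bool :=
  pvLoopA (days_statuses.filter (fun element => PySem.Str.isIn "week" element)) ""

-- ===== PORT B =====
-- B: one fused pass with a boolean prev_available flag
def pvLoopB : List String → Bool → Bool
  | [], _ => true
  | element :: rest, prev_available =>
    if PySem.Str.isIn "week" element then
      if prev_available && PySem.Str.isIn "not_available_" element then false
      else pvLoopB rest (PySem.Str.isIn "selected_" element)
    else pvLoopB rest prev_available

def no_not_available_week_after_available_py_alt (days_statuses : List String) : Bool :=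
  pvLoopB days_statuses false


-- ===== PRECONDITION & SPEC =====
def Spec_no_not_available_week_after_available_py (days_statuses : List String) (out : Bool) : Prop := out = no_not_available_week_after_available_py_alt days_statuses
instance (days_statuses : List String) (out : Bool) : Decidable (Spec_no_not_available_week_after_available_py days_statuses out) := by unfold Spec_no_not_available_week_after_available_py; infer_instance

-- ===== CLAIM (what is proved, stated in full; the proofs are below) =====
def Claim_equal_no_not_available_week_after_available_py : Prop := ∀ (days_statuses : List String), Dom_no_not_available_week_after_available_py days_statuses → Spec_no_not_available_week_after_available_py days_statuses (no_not_available_week_after_available_py days_statuses)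

-- ===== LEMMAS AND PROOFS =====

-- a string containing "not_selected_" also contains "selected_"
theorem pvAvail_eq (p : String) :
    (PySem.Str.isIn "not_selected_" p || PySem.Str.isIn "selected_" p)
      = PySem.Str.isIn "selected_" p := by
  cases h : PySem.Str.isIn "not_selected_" p with
  | false => rw [Bool.false_or]
  | true =>
    have hinf : "not_selected_".toList <:+: p.toList := (PySem.Str.isIn_iff_infix _ _).mp h
    have hsub : "selected_".toList <:+: "not_selected_".toList := by decide
    have hsel : PySem.Str.isIn "selected_" p = true :=
      (PySem.Str.isIn_iff_infix _ _).mpr (hsub.trans hinf)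
    simp only [Bool.true_or]
    exact hsel.symm

theorem pvLoop_eq (l : List String) (prev : String) :
    pvLoopA (l.filter (fun element => PySem.Str.isIn "week" element)) prev
      = pvLoopB l (PySem.Str.isIn "selected_" prev) := by
  induction l generalizing prev with
  | nil => rfl
  | cons e rest ih =>
    cases hw : PySem.Str.isIn "week" e with
    | true =>
      rw [List.filter_cons, if_pos hw]
      simp only [pvLoopA, pvLoopB, pvAvail_eq, hw, if_true]
      split_ifs with hc
      · rfl
      · exact ih e
    | false =>
      rw [List.filter_cons, if_neg (fun hcon => by rw [hw] at hcon; exact Bool.false_ne_true hcon)]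
      simp only [pvLoopB, hw, Bool.false_eq_true, if_false]
      exact ih prev

-- ===== VERDICT (by name: the statement is the Claim_ definition above) =====
theorem no_not_available_week_after_available_py_spec : Claim_equal_no_not_available_week_after_available_py := by
  intro ds _
  unfold Spec_no_not_available_week_after_available_py
  unfold no_not_available_week_after_available_py no_not_available_week_after_available_py_alt
  rw [pvLoop_eq, show PySem.Str.isIn "selected_" "" = false from by decide]
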